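-- pv_equiv track=rewrite | github.com/Optimumspace5/constrained-relevance-weighting | test.py | remaining_positions
-- ===== SOURCE A (Python) =====
-- def remaining_positions(mask: int, positions: list[int]) -> tuple[int, ...]:
--     out = []
--     i = 0
--     while mask:
--         if mask & 1:
--             out.append(positions[i])
--         mask >>= 1
--         i += 1
--     return tuple(out)
-- ===== SOURCE B (Python) =====
-- def remaining_positions(mask: int, positions: list[int]) -> tuple[int, ...]:
--     if mask <= 0:
--         return ()
--     q, r = divmod(mask, 2)
--     rest = remaining_positions(q, positions[1:])
--     return ((positions[0],) + rest) if r else rest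
-- ===== Notes on version B (the rewrite author's own statement) =====
-- stated objective: alternative
-- what changed: Replaces A's stateful while-loop (shifting the mask and advancing an index into positions) with a recursive decomposition: split mask with divmod, recurse on the quotient and the tail slice of positions, and cons the head element when the low bit is set; no index variable and no mutation.
import Mathlib
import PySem

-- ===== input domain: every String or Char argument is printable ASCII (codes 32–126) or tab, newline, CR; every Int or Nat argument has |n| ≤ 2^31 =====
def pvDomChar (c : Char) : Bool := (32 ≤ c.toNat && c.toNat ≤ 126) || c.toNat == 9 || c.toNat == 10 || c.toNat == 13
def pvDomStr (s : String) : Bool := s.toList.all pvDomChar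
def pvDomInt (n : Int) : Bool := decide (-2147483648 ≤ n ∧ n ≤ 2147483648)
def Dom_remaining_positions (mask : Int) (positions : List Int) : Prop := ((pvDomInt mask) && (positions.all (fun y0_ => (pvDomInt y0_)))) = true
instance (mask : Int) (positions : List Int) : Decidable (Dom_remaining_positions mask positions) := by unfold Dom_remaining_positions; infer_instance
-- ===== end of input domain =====

-- B replaces A's stateful while-loop (mask shifting + index into positions) with a
-- recursion: divmod the mask, recurse on the quotient and the tail of positions, cons
-- the head when the low bit is set; equal wherever A returns normally (Pre_).
-- ===== PORT A =====
-- one iteration of A's 'while mask' loop per fuel unit; 'none' from pyGet? is Python's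
-- IndexError (excluded by Pre_), the loop state is carried on unchanged there
def pvLoopA (positions : List Int) : Nat → Int → Int → List Int → List Int
  | 0, _, _, out => out
  | fuel + 1, mask, i, out =>
    if mask = 0 then out
    else
      let out' :=
        if PySem.Int.mod mask 2 = 1 then
          match PySem.List.pyGet? positions i with
          | some v => out ++ [v]
          | none => out
        else out
      pvLoopA positions fuel (PySem.Int.floordiv mask 2) (i + 1) out'

def remaining_positions (mask : Int) (positions : List Int) : List Int :=
  pvLoopA positions (mask.toNat + 1) mask 0 []

-- ===== PORT B =====
-- recursive Source B: base case mask <= 0, divmod split, recurse on tail positions[1:];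
-- positions[0] on the empty list is Python's IndexError (excluded by Pre_): the
-- 'none' branch carries the recursion's value unchanged
def remaining_positions_alt (mask : Int) (positions : List Int) : List Int :=
  if mask ≤ 0 then []
  else
    let q := PySem.Int.floordiv mask 2
    let r := PySem.Int.mod mask 2
    let rest := remaining_positions_alt q (PySem.List.slice positions (some 1) none)
    if r ≠ 0 then
      match PySem.List.pyGet? positions 0 with
      | some p => p :: rest
      | none => rest
    else rest
termination_by mask.toNat
decreasing_by
  have h : PySem.Int.floordiv mask 2 = mask / 2 :=
    PySem.Int.floordiv_eq_ediv_of_pos (by norm_num)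
  rw [h]; omega

-- ===== PRECONDITION & SPEC =====
-- A raises IndexError when a set bit's index reaches past positions (mask >= 2^len)
-- and loops forever on negative mask; Pre_ is exactly where A returns normally.
def Pre_remaining_positions (mask : Int) (positions : List Int) : Prop :=
  0 ≤ mask ∧ mask < 2 ^ positions.length

instance (mask : Int) (positions : List Int) : Decidable (Pre_remaining_positions mask positions) := by
  unfold Pre_remaining_positions; infer_instance

def pvWitness_remaining_positions : Int × List Int := (5, [10, 20, 30])

def Spec_remaining_positions (mask : Int) (positions : List Int) (out : List Int) : Prop := out = remaining_positions_alt mask positions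
instance (mask : Int) (positions : List Int) (out : List Int) : Decidable (Spec_remaining_positions mask positions out) := by unfold Spec_remaining_positions; infer_instance

-- ===== CLAIM (what is proved, stated in full; the proofs are below) =====
def Claim_equal_remaining_positions : Prop := ∀ (mask : Int) (positions : List Int), Dom_remaining_positions mask positions → Pre_remaining_positions mask positions → Spec_remaining_positions mask positions (remaining_positions mask positions)

-- ===== LEMMAS AND PROOFS =====

lemma pvAlt_nonpos (mask : Int) (ps : List Int) (h : mask ≤ 0) :
    remaining_positions_alt mask ps = [] := by
  rw [remaining_positions_alt]; simp [h]


lemma pvLoopA_eq_alt (ps : List Int) : ∀ (fuel : Nat) (full out : List Int) (mask : Int) (i : Nat),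
    0 ≤ mask → mask < 2 ^ ps.length → mask.toNat < fuel → ps = full.drop i →
    pvLoopA full fuel mask (i : Int) out = out ++ remaining_positions_alt mask ps := by
  induction ps with
  | nil =>
    intro fuel full out mask i h0 hlt hfuel hdrop
    have hm : mask = 0 := by simp at hlt; omega
    cases fuel with
    | zero => omega
    | succ f => simp [pvLoopA, hm, pvAlt_nonpos 0 [] le_rfl]
  | cons p t ih =>
    intro fuel full out mask i h0 hlt hfuel hdrop
    cases fuel with
    | zero => omega
    | succ f =>
      by_cases hm : mask = 0
      · subst hm
        simp [pvLoopA, pvAlt_nonpos 0 (p :: t) le_rfl]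
      · have hget : PySem.List.pyGet? full (i : Int) = some p := by
          rw [PySem.List.pyGet?_natCast]
          have := congrArg List.head? hdrop
          simpa [List.head?_drop] using this.symm
        have hdrop' : t = full.drop (i + 1) := by
          have := congrArg List.tail hdrop
          simpa [List.tail_drop] using this
        have hfd : PySem.Int.floordiv mask 2 = mask / 2 :=
          PySem.Int.floordiv_eq_ediv_of_pos (by norm_num)
        have hmod : PySem.Int.mod mask 2 = mask % 2 :=
          PySem.Int.mod_eq_emod_of_pos (by norm_num)
        have hpos : 0 < mask := lt_of_le_of_ne h0 (Ne.symm hm)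
        have h0' : 0 ≤ mask / 2 := by positivity
        have hlt' : mask / 2 < 2 ^ t.length := by
          have hh : (p :: t).length = t.length + 1 := rfl
          rw [hh, pow_succ] at hlt
          omega
        have hfuel' : (mask / 2).toNat < f := by omega
        have hrec := ih f full (if mask % 2 = 1 then out ++ [p] else out)
          (mask / 2) (i + 1) h0' hlt' hfuel' hdrop'
        -- unfold one step of B's recursion
        have halt : remaining_positions_alt mask (p :: t)
            = (if mask % 2 = 1 then [p] else [])
              ++ remaining_positions_alt (mask / 2) t := by
          rw [remaining_positions_alt]
          simp only [if_neg (not_le.mpr hpos), hfd, hmod,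
            PySem.List.slice_from_one, List.tail_cons]
          by_cases hb : mask % 2 = 1
          · simp [hb]
          · have hb0 : mask % 2 = 0 := by omega
            simp [hb0]
        simp only [pvLoopA, if_neg hm, hget, hfd, hmod]
        push_cast at hrec ⊢
        rw [hrec, halt]
        by_cases hb : mask % 2 = 1 <;> simp [hb]

-- ===== VERDICT (by name: the statement is the Claim_ definition above) =====
theorem remaining_positions_spec : Claim_equal_remaining_positions := by
  intro mask positions _ hpre
  unfold Spec_remaining_positions remaining_positions
  have := pvLoopA_eq_alt positions (mask.toNat + 1) positions [] mask 0
    hpre.1 hpre.2 (by omega) (by simp)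
  simpa using this
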